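-- pv_equiv track=rewrite | github.com/juandacoga/python_lerning | Python_Coursera/practica.py | panprimo
-- ===== SOURCE A (Python) =====
-- def panprimo(n):
--   if (n < 1023456789):
--     return False
--   # creamos un set con una lista que se genera automaticamente del 0 al 9
--   set_number = set([i for i in range(10)])
--   list_number = []
--   for i in sorted(str(n)):
--     list_number.append(int(i))
--   set_list_number = set(list_number)
--   is_pandigital = set_number.issubset(set_list_number)
--
--   last_number = int(str(n)[-3:])
--   is_prime = True
--   for i in range(2, last_number):
--     if last_number % i == 0:
--       is_prime = False
--       break
--
--   if (is_pandigital and is_prime):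
--     return True
--   return False
-- ===== SOURCE B (Python) =====
-- def panprimo(n):
--   if n < 1023456789:
--     return False
--   s = str(n)
--   digits = set()
--   for c in s:
--     digits.add(int(c))
--   if not all(d in digits for d in range(10)):
--     return False
--   last = int(s[-3:])
--   i = 2
--   while i * i <= last:
--     if last % i == 0:
--       return False
--     i += 1
--   return True
-- ===== Notes on version B (the rewrite author's own statement) =====
-- stated objective: faster
-- what changed: B builds one digit set in a single pass with early exits (no sorting, no intermediate list, no second set) and replaces the trial-division scan over range(2, last) by a while loop bounded at sqrt(last).
import Mathlib
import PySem

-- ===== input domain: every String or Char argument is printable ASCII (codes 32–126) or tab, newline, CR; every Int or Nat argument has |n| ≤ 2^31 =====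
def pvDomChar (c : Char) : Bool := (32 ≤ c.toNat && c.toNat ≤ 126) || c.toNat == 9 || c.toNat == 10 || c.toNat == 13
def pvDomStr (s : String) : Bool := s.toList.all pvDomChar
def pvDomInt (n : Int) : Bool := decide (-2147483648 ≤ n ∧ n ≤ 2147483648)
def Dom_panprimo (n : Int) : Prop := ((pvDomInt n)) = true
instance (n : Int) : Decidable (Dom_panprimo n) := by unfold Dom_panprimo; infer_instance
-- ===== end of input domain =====

-- B replaces A's sorted/two-set pandigital bookkeeping by one incrementally built digit set
-- with early exits, and bounds the trial-division loop at sqrt(last) instead of scanning to last.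

-- ===== PORT A =====
-- 'for i in range(2, last_number): if last_number % i == 0: is_prime = False; break'
def panprimoLoopA (m : Int) : List Int → Bool
  | [] => true
  | i :: rest => if PySem.Int.mod m i == 0 then false else panprimoLoopA m rest

def panprimo (n : Int) : Bool :=
  if n < 1023456789 then false
  else
    let set_number : PySem.Set Int := PySem.Set.ofList (PySem.List.pyRange 0 10 1)
    -- int(i) on each 1-char string; .getD 0 is unreachable: str(n) for n ≥ 1023456789 is all digits
    let list_number : List Int :=
      (PySem.List.sorted (PySem.Int.toChars n) (fun c => c) false).foldl
        (fun acc c => acc ++ [(PySem.Int.ofChars? [c]).getD 0]) []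
    let set_list_number : PySem.Set Int := PySem.Set.ofList list_number
    let is_pandigital := PySem.Set.issubset set_number set_list_number
    let last_number := (PySem.Int.ofChars? (PySem.List.slice (PySem.Int.toChars n) (some (-3)) none)).getD 0
    let is_prime := panprimoLoopA last_number (PySem.List.pyRange 2 last_number 1)
    if is_pandigital && is_prime then true else false

-- ===== PORT B =====
-- 'i = 2; while i*i <= last: if last % i == 0: return False; i += 1'
def panprimoLoopB (m i : Int) : Bool :=
  if h : i * i ≤ m then
    (if PySem.Int.mod m i == 0 then false else panprimoLoopB m (i + 1))
  else true
termination_by (m + 1 - i).toNat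
decreasing_by
  have hi : i ≤ i * i := by nlinarith [mul_self_nonneg (i - 1), mul_self_nonneg i]
  omega

def panprimo_alt (n : Int) : Bool :=
  if n < 1023456789 then false
  else
    let s := PySem.Int.toChars n
    let digits : PySem.Set Int :=
      s.foldl (fun acc c => PySem.Set.add acc ((PySem.Int.ofChars? [c]).getD 0)) PySem.Set.empty
    if !((PySem.List.pyRange 0 10 1).all (fun d => PySem.Set.contains digits d)) then false
    else
      let last := (PySem.Int.ofChars? (PySem.List.slice s (some (-3)) none)).getD 0
      panprimoLoopB last 2

-- ===== PRECONDITION & SPEC =====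
def Spec_panprimo (n : Int) (out : Bool) : Prop := out = panprimo_alt n
instance (n : Int) (out : Bool) : Decidable (Spec_panprimo n out) := by unfold Spec_panprimo; infer_instance

-- ===== CLAIM (what is proved, stated in full; the proofs are below) =====
def Claim_equal_panprimo : Prop := ∀ (n : Int), Dom_panprimo n → Spec_panprimo n (panprimo n)

-- ===== LEMMAS AND PROOFS =====

-- A's break loop returns false exactly when some divisor occurs in the range
theorem panprimoLoopA_eq (m : Int) (l : List Int) :
    panprimoLoopA m l = !l.any (fun i => PySem.Int.mod m i == 0) := by
  induction l with
  | nil => rfl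
  | cons i rest ih =>
    simp only [panprimoLoopA, List.any_cons]
    by_cases h : PySem.Int.mod m i == 0 <;> simp [h, ih]

-- B's while loop returns true exactly when no j ≥ i with j*j ≤ m divides m
theorem panprimoLoopB_eq_true_iff (m i : Int) (hi : 0 < i) :
    panprimoLoopB m i = true ↔ ∀ j, i ≤ j → j * j ≤ m → PySem.Int.mod m j ≠ 0 := by
  refine panprimoLoopB.induct m
    (motive := fun i => 0 < i →
      (panprimoLoopB m i = true ↔ ∀ j, i ≤ j → j * j ≤ m → PySem.Int.mod m j ≠ 0))
    ?_ ?_ ?_ i hi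
  · intro x h hdiv _
    rw [panprimoLoopB, dif_pos h, if_pos hdiv]
    constructor
    · intro hf; simp at hf
    · intro hall; exact absurd (beq_iff_eq.mp hdiv) (hall x le_rfl h)
  · intro x h hdiv ih hx
    rw [panprimoLoopB, dif_pos h, if_neg hdiv, ih (by omega)]
    constructor
    · intro hall j hxj hjm
      rcases eq_or_lt_of_le hxj with rfl | hlt
      · exact fun hz => hdiv (by simp [hz])
      · exact hall j (by omega) hjm
    · intro hall j hxj hjm
      exact hall j (by omega) hjm
  · intro x h hx
    rw [panprimoLoopB, dif_neg h]
    constructor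
    · intro _ j hxj hjm hz
      exact h (le_trans (by nlinarith) hjm)
    · intro _; rfl

-- a proper divisor of m exists iff a divisor not exceeding sqrt m exists
theorem divisor_iff_sqrt_divisor (m : Int) :
    (∃ i, 2 ≤ i ∧ i < m ∧ i ∣ m) ↔ (∃ i, 2 ≤ i ∧ i * i ≤ m ∧ i ∣ m) := by
  constructor
  · rintro ⟨i, h2, him, hk, hkk⟩
    have hk2 : 2 ≤ hk := by nlinarith
    by_cases hsq : i * i ≤ m
    · exact ⟨i, h2, hsq, ⟨hk, hkk⟩⟩
    · exact ⟨hk, hk2, by nlinarith, ⟨i, by linarith [hkk.symm]⟩⟩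
  · rintro ⟨i, h2, hsq, hdvd⟩
    exact ⟨i, h2, by nlinarith, hdvd⟩

-- A's full trial-division scan agrees with B's sqrt-bounded scan, for every Int m
theorem prime_scan_eq (m : Int) :
    panprimoLoopA m (PySem.List.pyRange 2 m 1) = panprimoLoopB m 2 := by
  rw [panprimoLoopA_eq, Bool.eq_iff_iff, panprimoLoopB_eq_true_iff m 2 (by norm_num)]
  simp only [Bool.not_eq_eq_eq_not, Bool.not_true, List.any_eq_false,
    PySem.List.mem_pyRange_one, beq_iff_eq, PySem.Int.mod_eq_zero_iff_dvd]
  constructor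
  · intro hA j h2 hjm hdvd
    have hjm' : j < m := by nlinarith
    exact hA j ⟨h2, hjm'⟩ ((PySem.Int.mod_eq_zero_iff_dvd m j).mp hdvd)
  · intro hB i hmem hdvd
    have : ∃ j, 2 ≤ j ∧ j * j ≤ m ∧ j ∣ m :=
      (divisor_iff_sqrt_divisor m).mp ⟨i, hmem.1, hmem.2, hdvd⟩
    obtain ⟨j, h2, hjm, hj⟩ := this
    exact hB j h2 hjm ((PySem.Int.mod_eq_zero_iff_dvd m j).mpr hj)

-- the two pandigital tests agree on every character list
theorem pandigital_eq (s : List Char) :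
    PySem.Set.issubset (PySem.Set.ofList (PySem.List.pyRange 0 10 1))
      (PySem.Set.ofList ((PySem.List.sorted s (fun c => c) false).foldl
        (fun acc c => acc ++ [(PySem.Int.ofChars? [c]).getD 0]) [])) =
    (PySem.List.pyRange 0 10 1).all (fun d => PySem.Set.contains
      (s.foldl (fun acc c => PySem.Set.add acc ((PySem.Int.ofChars? [c]).getD 0)) PySem.Set.empty) d) := by
  have hdig : s.foldl (fun acc c => PySem.Set.add acc ((PySem.Int.ofChars? [c]).getD 0)) PySem.Set.empty
      = PySem.Set.ofList (s.map (fun c => (PySem.Int.ofChars? [c]).getD 0)) := by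
    rw [PySem.Set.ofList_eq_foldl, List.foldl_map]
    rfl
  rw [hdig, PySem.List.foldl_append_singleton_eq_map, Bool.eq_iff_iff,
    PySem.Set.issubset_iff, List.all_eq_true]
  constructor
  · intro h d hd
    rw [PySem.Set.contains_iff, PySem.Set.mem_ofList]
    have := h d (by rwa [PySem.Set.mem_ofList])
    rw [PySem.Set.mem_ofList] at this
    simp only [List.nil_append, List.mem_map, PySem.List.mem_sorted] at this
    simpa only [List.mem_map] using this
  · intro h d hd
    rw [PySem.Set.mem_ofList] at hd ⊢
    have := h d hd
    rw [PySem.Set.contains_iff, PySem.Set.mem_ofList] at this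
    simp only [List.mem_map] at this
    simp only [List.nil_append, List.mem_map, PySem.List.mem_sorted]
    exact this

-- ===== VERDICT (by name: the statement is the Claim_ definition above) =====
theorem panprimo_spec : Claim_equal_panprimo := by
  intro n _
  unfold Spec_panprimo panprimo panprimo_alt
  by_cases hn : n < 1023456789
  · simp [hn]
  · simp only [hn, if_false]
    rw [pandigital_eq (PySem.Int.toChars n), prime_scan_eq]
    cases hp : (PySem.List.pyRange 0 10 1).all (fun d => PySem.Set.contains
      ((PySem.Int.toChars n).foldl (fun acc c => PySem.Set.add acc ((PySem.Int.ofChars? [c]).getD 0)) PySem.Set.empty) d) <;>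
      simp
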